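-- pv_equiv track=rewrite | github.com/zqwei/stock_tracker_and_action | src/portfolio_assistant/ingest/csv_mapping.py | _infer_with_template
-- ===== SOURCE A (Python) =====
-- def _normalize(text: str) -> str:
--     return " ".join(text.strip().lower().replace("_", " ").split())
--
-- def _match_key(text: str) -> str:
--     return "".join(ch for ch in text.strip().lower() if ch.isalnum())
--
-- def _infer_with_template(
--     columns: list[str], template: dict[str, list[str]]
-- ) -> dict[str, str]:
--     normalized_to_original = {_normalize(column): column for column in columns}
--     compact_to_original: dict[str, str] = {}
--     ambiguous_compact: set[str] = set()
--     for column in columns: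
--         compact = _match_key(column)
--         if not compact:
--             continue
--         previous = compact_to_original.get(compact)
--         if previous is None:
--             compact_to_original[compact] = column
--         elif previous != column:
--             ambiguous_compact.add(compact)
--
--     mapping: dict[str, str] = {}
--     for canonical, aliases in template.items():
--         candidates = [canonical, *aliases]
--         for candidate in candidates:
--             source_column = normalized_to_original.get(_normalize(candidate))
--             if not source_column:
--                 compact_candidate = _match_key(candidate)
--                 if compact_candidate and compact_candidate not in ambiguous_compact:
--                     source_column = compact_to_original.get(compact_candidate)
--             if source_column:
--                 mapping[canonical] = source_column
--                 break
--     return mapping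
-- ===== SOURCE B (Python) =====
-- def _normalize(text: str) -> str:
--     return " ".join(text.strip().lower().replace("_", " ").split())
--
-- def _match_key(text: str) -> str:
--     return "".join(ch for ch in text.strip().lower() if ch.isalnum())
--
-- def _infer_with_template(columns, template):
--     # No dict indexes: resolve each candidate by scanning the columns (paired
--     # with their precomputed normalized/compact forms); last normalized match
--     # wins, a compact-key match is used only when exactly one distinct column
--     # carries that key.
--     norms = [_normalize(c) for c in columns]
--     keys = [_match_key(c) for c in columns]
--     mapping = {}
--     for canonical, aliases in template.items():
--         for candidate in (canonical, *aliases):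
--             nk = _normalize(candidate)
--             col = None
--             for c, n in zip(columns, norms):
--                 if n == nk:
--                     col = c
--             if not col:
--                 ck = _match_key(candidate)
--                 if ck:
--                     matches = []
--                     for c, k in zip(columns, keys):
--                         if k == ck and c not in matches:
--                             matches.append(c)
--                     if len(matches) == 1:
--                         col = matches[0]
--             if col:
--                 mapping[canonical] = col
--                 break
--     return mapping
-- ===== Notes on version B (the rewrite author's own statement) =====
-- stated objective: alternative
-- what changed: Replaces A's three precomputed lookup indexes (normalized->column dict, compact->column dict, ambiguous-key set) with direct per-candidate scans over the columns paired with their precomputed normalized/compact forms: a last-wins scan for the normalized match and a distinct-match collection whose singleton case reproduces the unique-compact rule.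
import Mathlib
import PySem

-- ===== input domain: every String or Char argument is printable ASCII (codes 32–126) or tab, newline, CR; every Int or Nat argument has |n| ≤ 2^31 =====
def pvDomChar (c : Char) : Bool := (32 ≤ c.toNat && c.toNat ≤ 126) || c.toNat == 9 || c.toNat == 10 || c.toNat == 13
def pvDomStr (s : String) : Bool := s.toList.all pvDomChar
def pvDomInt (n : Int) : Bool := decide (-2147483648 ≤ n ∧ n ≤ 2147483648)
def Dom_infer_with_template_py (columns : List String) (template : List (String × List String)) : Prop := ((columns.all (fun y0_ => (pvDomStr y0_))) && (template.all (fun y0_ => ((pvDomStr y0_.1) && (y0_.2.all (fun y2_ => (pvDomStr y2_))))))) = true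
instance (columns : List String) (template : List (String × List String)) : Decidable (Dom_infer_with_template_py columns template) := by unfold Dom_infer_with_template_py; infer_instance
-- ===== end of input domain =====

-- B replaces A's three precomputed indexes with direct per-candidate scans of the
-- columns list (alternative decomposition, similar cost); return values proved equal.

-- ===== PORT A =====
-- _normalize(text) = " ".join(text.strip().lower().replace("_", " ").split())
def pyNormalize (t : String) : String :=
  PySem.Str.join " " (PySem.Str.split₀ (PySem.Str.replace (PySem.Str.lower (PySem.Str.strip t)) "_" " "))

-- _match_key(text) = "".join(ch for ch in text.strip().lower() if ch.isalnum())
def pyMatchKey (t : String) : String :=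
  String.ofList ((PySem.Chars.lower (PySem.Chars.strip t.toList)).filter PySem.Chars.isalnum)

-- the body of A's 'for column in columns' loop filling compact_to_original / ambiguous_compact
def compactStepA (p : PySem.Dict String String × PySem.Set String) (c : String) :
    PySem.Dict String String × PySem.Set String :=
  let compact := pyMatchKey c
  if compact = "" then p
  else
    match p.1.get? compact with
    | none => (p.1.insert compact c, p.2)
    | some prev => if prev ≠ c then (p.1, PySem.Set.add p.2 compact) else p

-- A's inner 'for candidate in candidates: … break' loop (None/"" are both falsy)
def inferFindA (n2o : PySem.Dict String String) (cd : PySem.Dict String String)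
    (amb : PySem.Set String) : List String → Option String
  | [] => none
  | cand :: rest =>
    match (if n2o.get? (pyNormalize cand) = none ∨ n2o.get? (pyNormalize cand) = some "" then
        (if pyMatchKey cand ≠ "" ∧ ¬ (pyMatchKey cand ∈ amb) then
          cd.get? (pyMatchKey cand)
        else n2o.get? (pyNormalize cand))
      else n2o.get? (pyNormalize cand)) with
    | some col => if col = "" then inferFindA n2o cd amb rest else some col
    | none => inferFindA n2o cd amb rest

def infer_with_template_py (columns : List String) (template : List (String × List String)) : List (String × String) :=
  let n2o : PySem.Dict String String :=
    columns.foldl (fun d c => d.insert (pyNormalize c) c) PySem.Dict.empty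
  let p : PySem.Dict String String × PySem.Set String :=
    columns.foldl compactStepA (PySem.Dict.empty, PySem.Set.empty)
  let mapping : PySem.Dict String String :=
    template.foldl (fun m kv =>
      match inferFindA n2o p.1 p.2 (kv.1 :: kv.2) with
      | some col => m.insert kv.1 col
      | none => m) PySem.Dict.empty
  mapping.items

-- ===== PORT B =====
-- B's last-wins scan of zip(columns, norms)
def lastNormScan (normPairs : List (String × String)) (nk : String) : Option String :=
  normPairs.foldl (fun acc p => if p.2 = nk then some p.1 else acc) none

-- the body of B's 'for c, k in zip(columns, keys)' distinct-match collection
def compactPairStep (k : String) (m : List String) (p : String × String) : List String :=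
  if p.2 = k ∧ p.1 ∉ m then m ++ [p.1] else m

-- distinct columns sharing the compact key ck, in first-occurrence order
def compactScan (keyPairs : List (String × String)) (ck : String) : List String :=
  keyPairs.foldl (compactPairStep ck) []

-- B's compact-key fallback: usable only when exactly one distinct column matches
def compactResolve (keyPairs : List (String × String)) (cand : String) : Option String :=
  if pyMatchKey cand = "" then none
  else
    match compactScan keyPairs (pyMatchKey cand) with
    | [c] => some c
    | _ => none

def inferFindB (normPairs keyPairs : List (String × String)) : List String → Option String
  | [] => none
  | cand :: rest =>
    match (match lastNormScan normPairs (pyNormalize cand) with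
      | some c => if c = "" then compactResolve keyPairs cand else some c
      | none => compactResolve keyPairs cand) with
    | some c => some c
    | none => inferFindB normPairs keyPairs rest

def inferBuildB (normPairs keyPairs : List (String × String)) :
    List (String × List String) → PySem.Dict String String → PySem.Dict String String
  | [], m => m
  | kv :: rest, m =>
    inferBuildB normPairs keyPairs rest
      (match inferFindB normPairs keyPairs (kv.1 :: kv.2) with
       | some col => m.insert kv.1 col
       | none => m)

def infer_with_template_py_alt (columns : List String) (template : List (String × List String)) : List (String × String) :=
  (inferBuildB (columns.zip (columns.map pyNormalize)) (columns.zip (columns.map pyMatchKey))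
    template PySem.Dict.empty).items

-- ===== PRECONDITION & SPEC =====
def Spec_infer_with_template_py (columns : List String) (template : List (String × List String)) (out : List (String × String)) : Prop := out = infer_with_template_py_alt columns template
instance (columns : List String) (template : List (String × List String)) (out : List (String × String)) : Decidable (Spec_infer_with_template_py columns template out) := by unfold Spec_infer_with_template_py; infer_instance

-- ===== CLAIM (what is proved, stated in full; the proofs are below) =====
def Claim_equal_infer_with_template_py : Prop := ∀ (columns : List String) (template : List (String × List String)), Dom_infer_with_template_py columns template → Spec_infer_with_template_py columns template (infer_with_template_py columns template)

-- ===== LEMMAS AND PROOFS =====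

-- proof-side form of B's distinct-match step, on the bare column
def compactStepB (k : String) (m : List String) (c : String) : List String :=
  if pyMatchKey c = k ∧ c ∉ m then m ++ [c] else m

theorem zip_map_self {α β : Type} (f : α → β) (l : List α) :
    l.zip (l.map f) = l.map (fun c => (c, f c)) := by
  induction l with
  | nil => rfl
  | cons x xs ih => simp [ih]

theorem lastNormScan_zip (columns : List String) (nk : String) :
    lastNormScan (columns.zip (columns.map pyNormalize)) nk
      = columns.foldl (fun acc c => if pyNormalize c = nk then some c else acc) none := by
  unfold lastNormScan
  rw [zip_map_self, List.foldl_map]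

theorem compactScan_zip (columns : List String) (ck : String) :
    compactScan (columns.zip (columns.map pyMatchKey)) ck
      = columns.foldl (compactStepB ck) [] := by
  unfold compactScan
  rw [zip_map_self, List.foldl_map]
  rfl

-- A's normalized->original dict looks up exactly like B's last-wins scan
theorem normDict_get (cols : List String) (d : PySem.Dict String String) (k : String) :
    (cols.foldl (fun d c => d.insert (pyNormalize c) c) d).get? k
      = cols.foldl (fun acc c => if pyNormalize c = k then some c else acc) (d.get? k) := by
  induction cols generalizing d with
  | nil => rfl
  | cons c cs ih =>
    rw [List.foldl_cons, List.foldl_cons, ih]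
    have h1 : (d.insert (pyNormalize c) c).get? k
        = if pyNormalize c = k then some c else d.get? k := by
      rw [PySem.Dict.get?_insert]
      rcases eq_or_ne (pyNormalize c) k with h | h
      · rw [if_pos h.symm, if_pos h]
      · rw [if_neg (Ne.symm h), if_neg h]
    rw [h1]

-- the joint invariant of A's compact dict + ambiguity set and B's distinct-match scan
theorem compactInv (cols : List String) (k : String) (hk : k ≠ "")
    (d : PySem.Dict String String) (amb : PySem.Set String) (m : List String)
    (h1 : d.get? k = m.head?) (h2 : k ∈ amb ↔ 2 ≤ m.length) :
    (cols.foldl compactStepA (d, amb)).1.get? k = (cols.foldl (compactStepB k) m).head?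
    ∧ (k ∈ (cols.foldl compactStepA (d, amb)).2 ↔ 2 ≤ (cols.foldl (compactStepB k) m).length) := by
  induction cols generalizing d amb m with
  | nil => exact ⟨h1, h2⟩
  | cons c cs ih =>
    rw [List.foldl_cons, List.foldl_cons]
    by_cases hce : pyMatchKey c = ""
    · rw [show compactStepA (d, amb) c = (d, amb) from by simp [compactStepA, hce],
        show compactStepB k m c = m from by
          unfold compactStepB; rw [if_neg]; rintro ⟨h, -⟩; exact hk (h.symm.trans hce)]
      exact ih d amb m h1 h2
    · by_cases hck : pyMatchKey c = k
      · cases m with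
        | nil =>
          have hd : d.get? (pyMatchKey c) = none := by simp [hck, h1]
          rw [show compactStepA (d, amb) c = (d.insert (pyMatchKey c) c, amb) from by
              simp [compactStepA, hce, hd],
            show compactStepB k [] c = [c] from by
              unfold compactStepB; rw [if_pos ⟨hck, List.not_mem_nil⟩]; rfl]
          refine ih _ _ _ ?_ ?_
          · rw [hck]; exact PySem.Dict.get?_insert_self d k c
          · rw [h2]; simp
        | cons p t =>
          have hd : d.get? (pyMatchKey c) = some p := by simp [hck, h1]
          by_cases hpc : p = c
          · rw [show compactStepA (d, amb) c = (d, amb) from by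
                simp [compactStepA, hce, hd, hpc],
              show compactStepB k (p :: t) c = p :: t from by
                unfold compactStepB; rw [if_neg]; rintro ⟨-, hnm⟩
                exact hnm (by rw [← hpc]; exact List.mem_cons_self)]
            exact ih d amb (p :: t) h1 h2
          · rw [show compactStepA (d, amb) c = (d, PySem.Set.add amb (pyMatchKey c)) from by
                simp [compactStepA, hce, hd]; exact fun h => absurd h hpc]
            by_cases hcm : c ∈ p :: t
            · rw [show compactStepB k (p :: t) c = p :: t from by
                  unfold compactStepB; rw [if_neg]; rintro ⟨-, hnm⟩; exact hnm hcm]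
              refine ih _ _ _ h1 ?_
              have hlen : 2 ≤ (p :: t).length := by
                rcases List.mem_cons.mp hcm with h | h
                · exact absurd h.symm hpc
                · cases t with
                  | nil => simp at h
                  | cons a b => simp
              exact ⟨fun _ => hlen, fun _ => (PySem.Set.mem_add amb (pyMatchKey c) k).mpr
                (Or.inr hck.symm)⟩
            · rw [show compactStepB k (p :: t) c = (p :: t) ++ [c] from by
                  unfold compactStepB; rw [if_pos ⟨hck, hcm⟩]]
              refine ih _ _ _ ?_ ?_
              · rw [h1]; simp
              · refine ⟨fun _ => by simp, fun _ => (PySem.Set.mem_add amb (pyMatchKey c) k).mpr (Or.inr hck.symm)⟩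
      · rw [show compactStepB k m c = m from by
            unfold compactStepB; rw [if_neg]; rintro ⟨h, -⟩; exact hck h]
        cases hd : d.get? (pyMatchKey c) with
        | none =>
          rw [show compactStepA (d, amb) c = (d.insert (pyMatchKey c) c, amb) from by
              simp [compactStepA, hce, hd]]
          refine ih _ _ _ ?_ h2
          rw [PySem.Dict.get?_insert, if_neg (fun h => hck h.symm), h1]
        | some prev =>
          by_cases hpc : prev = c
          · rw [show compactStepA (d, amb) c = (d, amb) from by
                simp [compactStepA, hce, hd, hpc]]
            exact ih d amb m h1 h2
          · rw [show compactStepA (d, amb) c = (d, PySem.Set.add amb (pyMatchKey c)) from by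
                simp [compactStepA, hce, hd]; exact fun h => absurd h hpc]
            refine ih _ _ _ h1 ?_
            rw [PySem.Set.mem_add]
            exact ⟨fun h => h.elim h2.mp (fun h => absurd h.symm hck), fun h => Or.inl (h2.mpr h)⟩

-- every collected distinct match carries the compact key it was collected for
theorem compactScan_key (cols : List String) (k : String) (m : List String)
    (hm : ∀ c ∈ m, pyMatchKey c = k) :
    ∀ c ∈ cols.foldl (compactStepB k) m, pyMatchKey c = k := by
  induction cols generalizing m with
  | nil => exact hm
  | cons c cs ih =>
    rw [List.foldl_cons]
    refine ih _ ?_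
    unfold compactStepB
    split_ifs with h
    · intro x hx
      rcases List.mem_append.mp hx with hx | hx
      · exact hm x hx
      · rw [List.mem_singleton.mp hx]; exact h.1
    · exact hm

theorem pyMatchKey_empty : pyMatchKey "" = "" := by decide

-- the per-candidate resolutions of A and B agree
theorem find_eq (columns : List String) (cands : List String) :
    inferFindA (columns.foldl (fun d c => d.insert (pyNormalize c) c) PySem.Dict.empty)
      (columns.foldl compactStepA (PySem.Dict.empty, PySem.Set.empty)).1
      (columns.foldl compactStepA (PySem.Dict.empty, PySem.Set.empty)).2 cands
      = inferFindB (columns.zip (columns.map pyNormalize))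
          (columns.zip (columns.map pyMatchKey)) cands := by
  induction cands with
  | nil => rfl
  | cons cand rest ih =>
    rw [inferFindA, inferFindB]
    have hs1 : (columns.foldl (fun d c => d.insert (pyNormalize c) c)
        PySem.Dict.empty).get? (pyNormalize cand)
        = lastNormScan (columns.zip (columns.map pyNormalize)) (pyNormalize cand) := by
      rw [lastNormScan_zip, normDict_get, PySem.Dict.get?_empty]
    rw [hs1]
    by_cases hck : pyMatchKey cand = ""
    · -- compact key empty: A keeps the normalized result, B's compactResolve is none
      have hA : ¬ (pyMatchKey cand ≠ "" ∧
          ¬ (pyMatchKey cand ∈ (columns.foldl compactStepA (PySem.Dict.empty, PySem.Set.empty)).2)) := by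
        rintro ⟨h, -⟩; exact h hck
      have hB : compactResolve (columns.zip (columns.map pyMatchKey)) cand = none := by
        unfold compactResolve; rw [if_pos hck]
      cases hlast : lastNormScan (columns.zip (columns.map pyNormalize)) (pyNormalize cand) with
      | none =>
        have hc1 : ((none : Option String) = none ∨ (none : Option String) = some "") := Or.inl rfl
        rw [if_pos hc1, if_neg hA]
        simp only [hB]
        exact ih
      | some c =>
        by_cases hc : c = ""
        · subst hc
          have hc1 : ((some "" : Option String) = none ∨ (some "" : Option String) = some "") :=
            Or.inr rfl
          rw [if_pos hc1, if_neg hA]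
          simp only [hB, if_true]
          exact ih
        · have hc1 : ¬ ((some c : Option String) = none ∨ (some c : Option String) = some "") := by
            rintro (h | h)
            · exact Option.some_ne_none c h
            · exact hc (Option.some.inj h)
          rw [if_neg hc1]
          simp only []
          rw [if_neg hc]
          rw [if_neg hc]
    · -- compact key nonempty: relate through the joint invariant
      have hinv := compactInv columns (pyMatchKey cand) hck PySem.Dict.empty PySem.Set.empty []
        (PySem.Dict.get?_empty _) (by simp [PySem.Set.empty])
      have hBres : (if ¬ (pyMatchKey cand ∈ (columns.foldl compactStepA (PySem.Dict.empty, PySem.Set.empty)).2) then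
            (columns.foldl compactStepA (PySem.Dict.empty, PySem.Set.empty)).1.get? (pyMatchKey cand)
          else (none : Option String)) = compactResolve (columns.zip (columns.map pyMatchKey)) cand := by
        unfold compactResolve
        rw [if_neg hck, compactScan_zip]
        rcases hm : columns.foldl (compactStepB (pyMatchKey cand)) [] with _ | ⟨c0, _ | ⟨c1, r⟩⟩
        · rw [if_pos (fun h => absurd (hinv.2.mp h) (by rw [hm]; simp)), hinv.1, hm]; rfl
        · rw [if_pos (fun h => absurd (hinv.2.mp h) (by rw [hm]; simp)), hinv.1, hm]; rfl
        · rw [if_neg (fun h => h (hinv.2.mpr (by rw [hm]; simp)))]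
      -- B's compact result, when some, is a column with a nonempty compact key
      have hne : ∀ c, compactResolve (columns.zip (columns.map pyMatchKey)) cand = some c → c ≠ "" := by
        intro c hc hceq
        unfold compactResolve at hc
        rw [if_neg hck, compactScan_zip] at hc
        rcases hm : columns.foldl (compactStepB (pyMatchKey cand)) [] with _ | ⟨c0, _ | ⟨c1, r⟩⟩ <;>
          rw [hm] at hc
        · simp at hc
        · have hkey := compactScan_key columns (pyMatchKey cand) [] (by simp) c0 (by rw [hm]; simp)
          rw [Option.some.inj hc] at hkey
          rw [hceq, pyMatchKey_empty] at hkey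
          exact hck hkey.symm
        · simp at hc
      cases hlast : lastNormScan (columns.zip (columns.map pyNormalize)) (pyNormalize cand) with
      | none =>
        have hc1 : ((none : Option String) = none ∨ (none : Option String) = some "") := Or.inl rfl
        rw [if_pos hc1]
        by_cases hmem : pyMatchKey cand ∈ (columns.foldl compactStepA (PySem.Dict.empty, PySem.Set.empty)).2
        · rw [if_neg (by rintro ⟨-, h⟩; exact h hmem)]
          have hres : compactResolve (columns.zip (columns.map pyMatchKey)) cand = none := by
            rw [← hBres, if_neg (fun h => h hmem)]
          simp only [hres]
          exact ih
        · rw [if_pos ⟨hck, hmem⟩]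
          have hres : (columns.foldl compactStepA (PySem.Dict.empty, PySem.Set.empty)).1.get?
              (pyMatchKey cand) = compactResolve (columns.zip (columns.map pyMatchKey)) cand := by
            rw [← hBres, if_pos hmem]
          rw [hres]
          cases hres2 : compactResolve (columns.zip (columns.map pyMatchKey)) cand with
          | none => simp only []; exact ih
          | some c0 => simp only []; rw [if_neg (hne c0 hres2)]
      | some c =>
        by_cases hc : c = ""
        · subst hc
          have hc1 : ((some "" : Option String) = none ∨ (some "" : Option String) = some "") :=
            Or.inr rfl
          rw [if_pos hc1]
          by_cases hmem : pyMatchKey cand ∈ (columns.foldl compactStepA (PySem.Dict.empty, PySem.Set.empty)).2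
          · rw [if_neg (by rintro ⟨-, h⟩; exact h hmem)]
            have hres : compactResolve (columns.zip (columns.map pyMatchKey)) cand = none := by
              rw [← hBres, if_neg (fun h => h hmem)]
            simp only [hres, if_true]
            exact ih
          · rw [if_pos ⟨hck, hmem⟩]
            have hres : (columns.foldl compactStepA (PySem.Dict.empty, PySem.Set.empty)).1.get?
                (pyMatchKey cand) = compactResolve (columns.zip (columns.map pyMatchKey)) cand := by
              rw [← hBres, if_pos hmem]
            rw [hres]
            cases hres2 : compactResolve (columns.zip (columns.map pyMatchKey)) cand with
            | none => simp only [if_true]; exact ih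
            | some c0 =>
              simp only [if_true]
              rw [if_neg (hne c0 hres2)]
        · have hc1 : ¬ ((some c : Option String) = none ∨ (some c : Option String) = some "") := by
            rintro (h | h)
            · exact Option.some_ne_none c h
            · exact hc (Option.some.inj h)
          rw [if_neg hc1]
          simp only []
          rw [if_neg hc]
          rw [if_neg hc]

-- A's mapping loop equals B's recursive builder
theorem build_eq (columns : List String) (tmpl : List (String × List String))
    (m : PySem.Dict String String) :
    tmpl.foldl (fun m kv =>
      match inferFindA (columns.foldl (fun d c => d.insert (pyNormalize c) c) PySem.Dict.empty)
        (columns.foldl compactStepA (PySem.Dict.empty, PySem.Set.empty)).1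
        (columns.foldl compactStepA (PySem.Dict.empty, PySem.Set.empty)).2 (kv.1 :: kv.2) with
      | some col => m.insert kv.1 col
      | none => m) m = inferBuildB (columns.zip (columns.map pyNormalize))
        (columns.zip (columns.map pyMatchKey)) tmpl m := by
  induction tmpl generalizing m with
  | nil => rfl
  | cons kv rest ih =>
    rw [List.foldl_cons, inferBuildB, find_eq]
    exact ih _

-- ===== VERDICT (by name: the statement is the Claim_ definition above) =====
theorem infer_with_template_py_spec : Claim_equal_infer_with_template_py := by
  intro columns template _
  unfold Spec_infer_with_template_py
  simp only [infer_with_template_py, infer_with_template_py_alt]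
  rw [build_eq]
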